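-- pv_equiv track=rewrite | github.com/kei-dongjin-kim/coding-test-python | src/P3602.py | concatHex36
-- ===== SOURCE A (Python) =====
-- import string
--
-- def concatHex36(n: int) -> str:
--     digits36 = string.digits + string.ascii_uppercase
--
--     p2 = n ** 2
--     p2res = ""
--     while p2 >= 16:
--         p2res += digits36[p2 % 16]
--         p2 //= 16
--     if p2 > 0:
--         p2res += digits36[p2]
--
--     p3 = n ** 3
--     p3res = ""
--     while p3 >= 36:
--         p3res += digits36[p3 % 36]
--         p3 //= 36
--     if p3 > 0:
--         p3res += digits36[p3]
--
--     return p2res[::-1] + p3res[::-1]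
-- ===== SOURCE B (Python) =====
-- import string
--
-- def concatHex36(n: int) -> str:
--     digits = string.digits + string.ascii_uppercase
--
--     def to_base(x: int, base: int) -> str:
--         if x <= 0:
--             return ""
--         # find the highest power of `base` not exceeding x, then peel digits
--         # from the most significant end downwards (no reversal needed).
--         p = 1
--         while p * base <= x:
--             p *= base
--         out = []
--         while p > 0:
--             out.append(digits[x // p])
--             x %= p
--             p //= base
--         return "".join(out)
--
--     return to_base(n * n, 16) + to_base(n * n * n, 36)
-- ===== Notes on version B (the rewrite author's own statement) =====
-- stated objective: alternative
-- what changed: Replaces A's two LSB-first remainder while-loops followed by string reversals with a most-significant-digit-first algorithm: find the highest power of the base not exceeding x, then peel digits top-down by div/mod with shrinking powers, so no reversal step exists.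
import Mathlib
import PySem

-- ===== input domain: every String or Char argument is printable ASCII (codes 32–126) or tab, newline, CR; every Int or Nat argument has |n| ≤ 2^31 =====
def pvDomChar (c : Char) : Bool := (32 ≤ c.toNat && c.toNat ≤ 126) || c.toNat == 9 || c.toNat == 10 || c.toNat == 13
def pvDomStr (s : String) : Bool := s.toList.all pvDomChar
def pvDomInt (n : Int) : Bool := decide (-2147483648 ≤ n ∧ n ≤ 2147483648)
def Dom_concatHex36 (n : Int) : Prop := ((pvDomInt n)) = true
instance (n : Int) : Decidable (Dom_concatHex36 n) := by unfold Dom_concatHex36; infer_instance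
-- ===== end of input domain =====

-- B replaces A's two LSB-first remainder loops + string reversals by a different
-- algorithm: find the highest power of the base ≤ x, then peel digits from the
-- most significant end downwards by div/mod with shrinking powers (objective: alternative).

-- shared: string.digits + string.ascii_uppercase, and indexing into it
def pvDigits : List Char := "0123456789ABCDEFGHIJKLMNOPQRSTUVWXYZ".toList
def pvDig (i : Int) : List Char := (PySem.List.pyGet? pvDigits i).toList

-- ===== PORT A =====
-- A's 'while p >= base: res += digits[p % base]; p //= base' then
-- 'if p > 0: res += digits[p]'; fuel (p.toNat + 1) is a totality guard only and is ample.
def pvALoop : Nat → Int → Int → List Char → List Char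
  | 0, _, _, acc => acc
  | f + 1, p, base, acc =>
    if base ≤ p then
      pvALoop f (PySem.Int.floordiv p base) base (acc ++ pvDig (PySem.Int.mod p base))
    else if 0 < p then acc ++ pvDig p else acc

def concatHex36 (n : Int) : String :=
  String.mk ((pvALoop ((n ^ 2).toNat + 1) (n ^ 2) 16 []).reverse
             ++ (pvALoop ((n ^ 3).toNat + 1) (n ^ 3) 36 []).reverse)

-- ===== PORT B =====
-- Source B's first while loop: grow p by factors of base while p * base <= x (fuel is ample).
def pvFindPow : Nat → Int → Int → Int → Int
  | 0, _, _, p => p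
  | f + 1, x, base, p => if p * base ≤ x then pvFindPow f x base (p * base) else p

-- Source B's second while loop: emit digits[x // p], x %= p, p //= base, while p > 0.
def pvExtract : Nat → Int → Int → Int → List Char
  | 0, _, _, _ => []
  | f + 1, x, base, p =>
    if 0 < p then
      pvDig (PySem.Int.floordiv x p)
        ++ pvExtract f (PySem.Int.mod x p) base (PySem.Int.floordiv p base)
    else []

-- Source B's to_base(x, base)
def pvToBase (x base : Int) : List Char :=
  if x ≤ 0 then []
  else pvExtract (x.toNat + 1) x base (pvFindPow (x.toNat + 1) x base 1)

def concatHex36_alt (n : Int) : String :=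
  String.mk (pvToBase (n * n) 16 ++ pvToBase (n * n * n) 36)

-- ===== PRECONDITION & SPEC =====
def Spec_concatHex36 (n : Int) (out : String) : Prop := out = concatHex36_alt n
instance (n : Int) (out : String) : Decidable (Spec_concatHex36 n out) := by unfold Spec_concatHex36; infer_instance

-- ===== CLAIM (what is proved, stated in full; the proofs are below) =====
def Claim_equal_concatHex36 : Prop := ∀ (n : Int), Dom_concatHex36 n → Spec_concatHex36 n (concatHex36 n)

-- ===== LEMMAS AND PROOFS =====

-- proof-side normal form: pvP b k y = digits of y at positions k, k-1, …, 0 (base b)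
def pvP (b : Int) : Nat → Int → List Char
  | 0, y => pvDig (y % b)
  | k + 1, y => pvDig (y / b ^ (k + 1) % b) ++ pvP b k y

-- proof-side msb-first rendering of A's loop output
def pvMsb : Nat → Int → Int → List Char
  | 0, _, _ => []
  | f + 1, x, base =>
    if base ≤ x then
      pvMsb f (PySem.Int.floordiv x base) base ++ pvDig (PySem.Int.mod x base)
    else if 0 < x then pvDig x else []

theorem pvDig_reverse (i : Int) : (pvDig i).reverse = pvDig i := by
  unfold pvDig
  cases PySem.List.pyGet? pvDigits i <;> simp

theorem pvALoop_reverse_eq (f : Nat) :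
    ∀ (p base : Int) (acc : List Char),
      (pvALoop f p base acc).reverse = pvMsb f p base ++ acc.reverse := by
  induction f with
  | zero => intro p base acc; simp [pvALoop, pvMsb]
  | succ f ih =>
    intro p base acc
    by_cases h : base ≤ p
    · simp [pvALoop, pvMsb, h, ih, pvDig_reverse]
    · by_cases hp : 0 < p <;> simp [pvALoop, pvMsb, h, hp, pvDig_reverse]

theorem pv_ediv_ediv (b : Int) (hb : 0 < b) (k : Nat) (y : Int) :
    y / b / b ^ k = y / b ^ (k + 1) := by
  rw [Int.ediv_ediv_of_nonneg (le_of_lt hb), pow_succ, mul_comm]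

theorem pvP_shift (b : Int) (hb : 2 ≤ b) :
    ∀ (k : Nat) (y : Int),
      pvP b (k + 1) y = pvP b k (y / b) ++ pvDig (y % b) := by
  intro k
  induction k with
  | zero =>
    intro y
    show pvDig (y / b ^ (0 + 1) % b) ++ pvP b 0 y = pvP b 0 (y / b) ++ pvDig (y % b)
    show pvDig (y / b ^ (0 + 1) % b) ++ pvDig (y % b) = pvDig (y / b % b) ++ pvDig (y % b)
    rw [pow_one]
  | succ k ih =>
    intro y
    show pvDig (y / b ^ (k + 2) % b) ++ pvP b (k + 1) y = _
    rw [ih y]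
    show _ = pvDig (y / b / b ^ (k + 1) % b) ++ pvP b k (y / b) ++ pvDig (y % b)
    rw [pv_ediv_ediv b (by omega) (k + 1) y]
    simp

theorem pvMsb_eq_pvP (b : Int) (hb : 2 ≤ b) :
    ∀ (k f : Nat) (x : Int), k < f → b ^ k ≤ x → x < b ^ (k + 1) →
      pvMsb f x b = pvP b k x := by
  intro k
  induction k with
  | zero =>
    intro f x hf h1 h2
    obtain ⟨f', rfl⟩ : ∃ f', f = f' + 1 := ⟨f - 1, by omega⟩
    simp only [pow_zero] at h1
    simp only [zero_add, pow_one] at h2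
    have hx : ¬ b ≤ x := by omega
    simp [pvMsb, hx, show (0:Int) < x by omega, pvP, Int.emod_eq_of_lt (by omega) h2]
  | succ k ih =>
    intro f x hf h1 h2
    obtain ⟨f', rfl⟩ : ∃ f', f = f' + 1 := ⟨f - 1, by omega⟩
    have hbx : b ≤ x := le_trans (by calc b = b ^ 1 := (pow_one b).symm
      _ ≤ b ^ (k + 1) := pow_le_pow_right₀ (by omega) (by omega)) h1
    have hbpos : (0:Int) < b := by omega
    have hq1 : b ^ k ≤ x / b := by
      rw [Int.le_ediv_iff_mul_le hbpos]; rw [pow_succ] at h1; exact h1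
    have hq2 : x / b < b ^ (k + 1) := by
      rw [Int.ediv_lt_iff_lt_mul hbpos]; rw [pow_succ] at h2; exact h2
    have hrec := ih f' (x / b) (by omega) hq1 hq2
    simp only [pvMsb, if_pos hbx,
      PySem.Int.floordiv_eq_ediv_of_pos hbpos, PySem.Int.mod_eq_emod_of_pos hbpos,
      hrec]
    rw [pvP_shift b hb k x]

theorem pv_digit_mod_pow (b : Int) (hb : 0 < b) (k i : Nat) (hik : i ≤ k) (y : Int) :
    (y % b ^ (k + 1)) / b ^ i % b = y / b ^ i % b := by
  have hpow : (0:Int) < b ^ i := pow_pos hb i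
  have hsplit : y = y % b ^ (k + 1) + (y / b ^ (k + 1) * b ^ (k + 1 - i)) * b ^ i := by
    have : b ^ (k + 1 - i) * b ^ i = b ^ (k + 1) := by
      rw [← pow_add]; congr 1; omega
    calc y = b ^ (k + 1) * (y / b ^ (k + 1)) + y % b ^ (k + 1) := (Int.mul_ediv_add_emod _ _).symm
      _ = _ := by rw [← this]; ring
  conv_rhs => rw [hsplit]
  rw [Int.add_mul_ediv_right _ _ (ne_of_gt hpow)]
  have hfac : y / b ^ (k + 1) * b ^ (k + 1 - i)
      = y / b ^ (k + 1) * b ^ (k - i) * b := by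
    rw [mul_assoc, ← pow_succ]; congr 2; omega
  rw [hfac, Int.add_mul_emod_self_right]

theorem pvP_congr (b : Int) :
    ∀ (k : Nat) (y z : Int), (∀ i : Nat, i ≤ k → y / b ^ i % b = z / b ^ i % b) →
      pvP b k y = pvP b k z := by
  intro k
  induction k with
  | zero =>
    intro y z h
    have := h 0 (by omega)
    simpa [pvP, pow_zero, Int.ediv_one] using congrArg pvDig this
  | succ k ih =>
    intro y z h
    simp only [pvP]
    rw [h (k + 1) (by omega), ih y z (fun i hi => h i (by omega))]

theorem pvExtract_zero_p (f : Nat) (x b : Int) : pvExtract f x b 0 = [] := by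
  cases f <;> simp [pvExtract]

theorem pvExtract_eq_pvP (b : Int) (hb : 2 ≤ b) :
    ∀ (k f : Nat) (y : Int), k < f → 0 ≤ y → y < b ^ (k + 1) →
      pvExtract f y b (b ^ k) = pvP b k y := by
  intro k
  induction k with
  | zero =>
    intro f y hf hy h2
    obtain ⟨f', rfl⟩ : ∃ f', f = f' + 1 := ⟨f - 1, by omega⟩
    have h1b : PySem.Int.floordiv 1 b = 0 := by
      rw [PySem.Int.floordiv_eq_ediv_of_pos (by omega)]
      exact Int.ediv_eq_zero_of_lt (by omega) (by omega)
    simp only [pow_zero] at *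
    simp [pvExtract, h1b, pvExtract_zero_p, pvP]
    rw [Int.emod_eq_of_lt hy (by simpa using h2)]
  | succ k ih =>
    intro f y hf hy h2
    obtain ⟨f', rfl⟩ : ∃ f', f = f' + 1 := ⟨f - 1, by omega⟩
    have hpow : (0:Int) < b ^ (k + 1) := pow_pos (by omega) _
    have hpb : PySem.Int.floordiv (b ^ (k + 1)) b = b ^ k := by
      rw [PySem.Int.floordiv_eq_ediv_of_pos (by omega : (0:Int) < b), pow_succ,
        Int.mul_ediv_cancel _ (by omega)]
    have hmod0 : (0:Int) ≤ y % b ^ (k + 1) := Int.emod_nonneg _ (ne_of_gt hpow)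
    have hmod1 : y % b ^ (k + 1) < b ^ (k + 1) := Int.emod_lt_of_pos _ hpow
    simp only [pvExtract, if_pos hpow,
      PySem.Int.floordiv_eq_ediv_of_pos hpow, PySem.Int.mod_eq_emod_of_pos hpow,
      hpb, ih f' _ (by omega) hmod0 hmod1]
    have hcongr : pvP b k (y % b ^ (k + 1)) = pvP b k y :=
      pvP_congr b k _ _ (fun i hi => pv_digit_mod_pow b (by omega) k i hi y)
    have hqlt : y / b ^ (k + 1) < b := by
      rw [Int.ediv_lt_iff_lt_mul hpow]; rw [pow_succ] at h2; linarith [h2]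
    have hqnn : (0:Int) ≤ y / b ^ (k + 1) := Int.ediv_nonneg hy (le_of_lt hpow)
    rw [hcongr]
    show _ = pvDig (y / b ^ (k + 1) % b) ++ pvP b k y
    rw [Int.emod_eq_of_lt hqnn hqlt]

theorem pvFindPow_spec (b : Int) (hb : 2 ≤ b) :
    ∀ (f : Nat) (x p : Int), 0 < p → p ≤ x → x < p * b ^ f →
      ∃ j : Nat, pvFindPow f x b p = p * b ^ j ∧ p * b ^ j ≤ x ∧ x < p * b ^ (j + 1) := by
  intro f
  induction f with
  | zero => intro x p hp h1 h2; simp at h2; omega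
  | succ f ih =>
    intro x p hp h1 h2
    by_cases h : p * b ≤ x
    · have hx : x < p * b * b ^ f := by rw [mul_assoc, ← pow_succ']; exact h2
      obtain ⟨j, hj1, hj2, hj3⟩ := ih x (p * b) (by positivity) h hx
      refine ⟨j + 1, ?_, ?_, ?_⟩
      · simp [pvFindPow, h, hj1, pow_succ]; ring
      · calc p * b ^ (j + 1) = p * b * b ^ j := by rw [pow_succ]; ring
          _ ≤ x := hj2
      · calc x < p * b * b ^ (j + 1) := hj3
          _ = p * b ^ (j + 2) := by rw [pow_succ, pow_succ]; ring
    · exact ⟨0, by simp [pvFindPow, h], by simpa using h1, by rw [pow_one]; omega⟩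

-- growth fact used to discharge the fuel bounds
theorem pv_lt_pow (b : Int) (hb : 2 ≤ b) (j : Nat) : (j : Int) < b ^ j := by
  have h2 : (j : Int) < 2 ^ j := by exact_mod_cast Nat.lt_two_pow_self
  have : (2:Int) ^ j ≤ b ^ j := pow_le_pow_left₀ (by omega) hb j
  omega

-- one base-conversion part: A's loop (reversed) = Source B's to_base
theorem pvPart_eq (x b : Int) (hb : 2 ≤ b) :
    (pvALoop (x.toNat + 1) x b []).reverse = pvToBase x b := by
  by_cases hx : x ≤ 0
  · have ht : x.toNat = 0 := Int.toNat_of_nonpos hx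
    rw [pvToBase, if_pos hx, ht]
    simp [pvALoop, show ¬ b ≤ x by omega, show ¬ (0:Int) < x by omega]
  · rw [not_le] at hx
    have hxt : (x.toNat : Int) = x := Int.toNat_of_nonneg (le_of_lt hx)
    have hfuel : x < 1 * b ^ (x.toNat + 1) := by
      have := pv_lt_pow b hb (x.toNat + 1)
      omega
    obtain ⟨j, hj1, hj2, hj3⟩ :=
      pvFindPow_spec b hb (x.toNat + 1) x 1 (by omega) (by omega) hfuel
    simp only [one_mul] at hj1 hj2 hj3
    have hjx : (j : Int) < x := lt_of_lt_of_le (pv_lt_pow b hb j) hj2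
    have hjf : j < x.toNat + 1 := by omega
    rw [pvALoop_reverse_eq]
    rw [pvToBase, if_neg (by omega), hj1]
    rw [pvMsb_eq_pvP b hb j _ x hjf hj2 hj3,
      pvExtract_eq_pvP b hb j _ x hjf (le_of_lt hx) hj3]
    simp

-- ===== VERDICT (by name: the statement is the Claim_ definition above) =====
theorem concatHex36_spec : Claim_equal_concatHex36 := by
  intro n _
  unfold Spec_concatHex36 concatHex36 concatHex36_alt
  rw [pvPart_eq (n ^ 2) 16 (by omega), pvPart_eq (n ^ 3) 36 (by omega)]
  have h2 : n ^ 2 = n * n := by ring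
  have h3 : n ^ 3 = n * n * n := by ring
  rw [h2, h3]
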